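-- pv_equiv track=rewrite | github.com/jonghoonok/Algorithm_Study | D2/D2_4865.py | str_check2
-- ===== SOURCE A (Python) =====
-- def str_check2(str1, str2):
--     # 문자열 str1에 포함된 글자들이 str2에 몇개씩 들어있는지 저장할 리스트
--     check_list = [0]*len(str1)
--
--     for i in range(len(str2)):
--         for j in range(len(str1)):
--             # continue를 이용하여 중복된 항목은 패스
--             if str1[j] in str1[:j]:
--                 continue
--             if str2[i] == str1[j]:
--                 check_list[j] += 1
--     # max를 구현하여 check_list내 최댓값을 반환
--     result = 0
--     for element in check_list:
--         if element > result:
--             result = element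
--     return result
-- ===== SOURCE B (Python) =====
-- def str_check2(str1, str2):
--     # count every character of str2 once, then take the best count over the
--     # distinct characters of str1
--     cnt = {}
--     for ch in str2:
--         cnt[ch] = cnt.get(ch, 0) + 1
--     best = 0
--     for ch in dict.fromkeys(str1):
--         v = cnt.get(ch, 0)
--         if v > best:
--             best = v
--     return best
-- ===== Notes on version B (the rewrite author's own statement) =====
-- stated objective: faster
-- what changed: Replaces the nested scan of str1 for every character of str2 (with a repeated prefix-membership duplicate test) by one counting pass over str2 into a dict followed by one pass over the distinct characters of str1.
import Mathlib
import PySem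

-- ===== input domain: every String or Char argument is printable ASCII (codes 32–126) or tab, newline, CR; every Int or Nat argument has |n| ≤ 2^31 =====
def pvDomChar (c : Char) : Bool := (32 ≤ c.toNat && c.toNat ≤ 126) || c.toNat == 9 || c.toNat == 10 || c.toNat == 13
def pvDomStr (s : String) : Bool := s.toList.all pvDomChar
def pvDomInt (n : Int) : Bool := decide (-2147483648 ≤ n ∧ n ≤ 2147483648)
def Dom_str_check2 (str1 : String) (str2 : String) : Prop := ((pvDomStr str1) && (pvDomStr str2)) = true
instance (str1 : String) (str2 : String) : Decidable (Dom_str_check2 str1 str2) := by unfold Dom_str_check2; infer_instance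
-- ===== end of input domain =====

-- B replaces A's nested per-character scan of str1 by one counting pass over str2
-- into a dict plus one pass over the distinct characters of str1 (objective: faster).


-- ===== PORT A =====
-- the body of A's inner loop over j (c is the already-fetched str2[i]);
-- 'str1[j] in str1[:j]' is a one-character 'in', i.e. list membership (exact)
def stepA (l1 : List Char) (c : Char) (cl : List Int) (j : Int) : List Int :=
  if PySem.List.pyGetD l1 j ' ' ∈ PySem.List.slice l1 none (some j) then cl
  else if c = PySem.List.pyGetD l1 j ' ' then
    PySem.List.pySetD cl j (PySem.List.pyGetD cl j 0 + 1)
  else cl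

-- literal port of A
def str_check2 (str1 : String) (str2 : String) : Int :=
  let l1 := str1.toList
  let l2 := str2.toList
  let check_list : List Int := PySem.List.pyRepeat [0] (PySem.Str.len str1)
  let check_list :=
    (PySem.List.pyRange 0 (PySem.Str.len str2) 1).foldl (fun cl i =>
      (PySem.List.pyRange 0 (PySem.Str.len str1) 1).foldl
        (stepA l1 (PySem.List.pyGetD l2 i ' ')) cl) check_list
  check_list.foldl (fun result element => if element > result then element else result) 0

-- ===== PORT B =====
def str_check2_alt (str1 : String) (str2 : String) : Int :=
  let cnt := str2.toList.foldl (fun d c => d.insert c (d.getD c 0 + 1)) PySem.Dict.empty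
  (PySem.List.dedup str1.toList).foldl (fun best c =>
    let v := cnt.getD c 0
    if v > best then v else best) 0

-- ===== PRECONDITION & SPEC =====
def Spec_str_check2 (str1 : String) (str2 : String) (out : Int) : Prop := out = str_check2_alt str1 str2
instance (str1 : String) (str2 : String) (out : Int) : Decidable (Spec_str_check2 str1 str2 out) := by unfold Spec_str_check2; infer_instance

-- ===== CLAIM (what is proved, stated in full; the proofs are below) =====
def Claim_equal_str_check2 : Prop := ∀ (str1 : String) (str2 : String), Dom_str_check2 str1 str2 → Spec_str_check2 str1 str2 (str_check2 str1 str2)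

-- ===== LEMMAS AND PROOFS =====

lemma stepA_len (l1 : List Char) (c : Char) (cl : List Int) (j : Int) :
    (stepA l1 c cl j).length = cl.length := by
  unfold stepA; split_ifs <;> simp [PySem.List.length_pySetD]

lemma innerA_len (l1 : List Char) (c : Char) (r : List Int) :
    ∀ cl : List Int, (r.foldl (stepA l1 c) cl).length = cl.length := by
  induction r with
  | nil => intro cl; rfl
  | cons j r ih => intro cl; simp [List.foldl_cons, ih, stepA_len]

lemma innerA (l1 : List Char) (c : Char) :
    ∀ (m : Nat) (a : Nat) (cl : List Int) (_ha : a + m = l1.length) (_hcl : cl.length = l1.length),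
    ∀ k (hk : k < l1.length),
      ((PySem.List.pyRange (a : Int) (l1.length : Int) 1).foldl (stepA l1 c) cl).getD k 0 =
      (if a ≤ k ∧ l1[k] ∉ l1.take k ∧ l1[k] = c then cl.getD k 0 + 1 else cl.getD k 0) := by
  intro m
  induction m with
  | zero =>
    intro a cl ha hcl k hk
    rw [PySem.List.pyRange_one_eq_nil (by omega)]
    simp only [List.foldl_nil]
    split_ifs with h
    · omega
    · rfl
  | succ m ih =>
    intro a cl ha hcl k hk
    rw [PySem.List.pyRange_one_cons (by omega : (a:Int) < (l1.length:Int))]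
    rw [List.foldl_cons]
    have h1 : ((a:Int) + 1) = ((a+1 : Nat) : Int) := by push_cast; ring
    rw [h1, ih (a+1) _ (by omega) (by rw [stepA_len]; omega) k hk]
    have ha' : a < l1.length := by omega
    -- evaluate one step of stepA at index a
    have hstep : ∀ (i : Nat),
        (stepA l1 c cl (a:Int)).getD i 0 =
        (if i = a ∧ l1[a] ∉ l1.take a ∧ l1[a] = c then cl.getD i 0 + 1 else cl.getD i 0) := by
      intro i
      unfold stepA
      rw [PySem.List.slice_to_natCast]
      have hga : PySem.List.pyGetD l1 (a:Int) ' ' = l1[a] := by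
        simp [List.getD_eq_getElem?_getD, List.getElem?_eq_getElem ha']
      rw [hga]
      by_cases hmem : l1[a] ∈ l1.take a
      · rw [if_pos hmem, if_neg (fun h => h.2.1 hmem)]
      · rw [if_neg hmem]
        by_cases heq : c = l1[a]
        · rw [if_pos heq, PySem.List.pySetD_natCast, PySem.List.pyGetD_natCast]
          by_cases hia : i = a
          · subst hia
            rw [if_pos ⟨rfl, hmem, heq.symm⟩]
            simp [List.getD_eq_getElem?_getD, hcl, ha']
          · rw [if_neg (fun h => hia h.1)]
            rw [List.getD_eq_getElem?_getD, List.getD_eq_getElem?_getD,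
              List.getElem?_set, if_neg (fun h : a = i => hia h.symm)]
            rfl
        · rw [if_neg heq, if_neg (fun h => heq h.2.2.symm)]
    rw [hstep k]
    by_cases hQk : l1[k] ∉ l1.take k ∧ l1[k] = c
    · by_cases hka : k = a
      · subst hka
        have hC1 : ¬(k+1 ≤ k ∧ l1[k] ∉ List.take k l1 ∧ l1[k] = c) :=
          fun h => absurd h.1 (by omega)
        rw [if_neg hC1, if_pos ⟨rfl, hQk⟩, if_pos ⟨le_refl k, hQk⟩]
      · have hC2 : ¬(k = a ∧ l1[a] ∉ List.take a l1 ∧ l1[a] = c) := fun h => hka h.1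
        rw [if_neg hC2]
        by_cases hak : a + 1 ≤ k
        · rw [if_pos ⟨hak, hQk⟩, if_pos ⟨by omega, hQk⟩]
        · have hC3 : ¬(a ≤ k ∧ l1[k] ∉ List.take k l1 ∧ l1[k] = c) := by
            rintro ⟨hle, -⟩; omega
          rw [if_neg (fun h => hak h.1), if_neg hC3]
    · have hC1 : ¬(a+1 ≤ k ∧ l1[k] ∉ List.take k l1 ∧ l1[k] = c) := fun h => hQk h.2
      have hC3 : ¬(a ≤ k ∧ l1[k] ∉ List.take k l1 ∧ l1[k] = c) := fun h => hQk h.2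
      have hC2 : ¬(k = a ∧ l1[a] ∉ List.take a l1 ∧ l1[a] = c) := by
        rintro ⟨rfl, hq⟩; exact hQk hq
      rw [if_neg hC1, if_neg hC3, if_neg hC2]

-- A's whole double loop: entry k of the check list gets count(l2', l1[k]) at the
-- first occurrence of l1[k], and stays 0 at duplicate positions
lemma outerA (l1 : List Char) :
    ∀ (l2 : List Char) (cl : List Int) (_hcl : cl.length = l1.length) (k : Nat) (hk : k < l1.length),
    (l2.foldl (fun cl c => (PySem.List.pyRange (0:Int) (l1.length : Int) 1).foldl (stepA l1 c) cl) cl).getD k 0 =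
    cl.getD k 0 + (if l1[k] ∉ l1.take k then (l2.count l1[k] : Int) else 0) := by
  intro l2
  induction l2 with
  | nil => intro cl hcl k hk; simp
  | cons c l2 ih =>
    intro cl hcl k hk
    rw [List.foldl_cons, ih _ (by rw [innerA_len]; exact hcl) k hk]
    have hinner := innerA l1 c l1.length 0 cl (by omega) hcl k hk
    simp only [Nat.cast_zero] at hinner
    rw [hinner]
    by_cases hfo : l1[k] ∉ l1.take k
    · rw [if_pos hfo]
      by_cases hc : l1[k] = c
      · rw [if_pos ⟨Nat.zero_le k, hfo, hc⟩, if_pos hfo]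
        rw [List.count_cons, if_pos (by simp [hc])]
        push_cast; ring
      · rw [if_neg (fun h => hc h.2.2), if_pos hfo]
        rw [List.count_cons, if_neg (by simpa using Ne.symm hc)]
        push_cast; ring
    · rw [if_neg hfo, if_neg (fun h => hfo h.2.1), if_neg hfo]

lemma outerA_len (l1 : List Char) (l2 : List Char) :
    ∀ cl : List Int,
    (l2.foldl (fun cl c => (PySem.List.pyRange (0:Int) (l1.length : Int) 1).foldl (stepA l1 c) cl) cl).length
      = cl.length := by
  induction l2 with
  | nil => intro cl; rfl
  | cons c l2 ih => intro cl; rw [List.foldl_cons, ih, innerA_len]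

-- the two running maxima agree: A folds over the per-first-occurrence counts, B over
-- the counts of the distinct characters
lemma max_folds_eq (l1 l2 : List Char) (F : List Int)
    (hlen : F.length = l1.length)
    (hF : ∀ k (hk : k < l1.length),
      F.getD k 0 = if l1[k] ∉ l1.take k then (l2.count l1[k] : Int) else 0) :
    F.foldl max 0 = ((PySem.List.dedup l1).map (fun c => (l2.count c : Int))).foldl max 0 := by
  set LB := (PySem.List.dedup l1).map (fun c => (l2.count c : Int)) with hLB
  apply le_antisymm
  · rcases PySem.List.foldl_max_mem F (0:Int) with h | h
    · rw [h]; exact (PySem.List.le_foldl_max LB 0).1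
    · obtain ⟨k, hk, hFk⟩ := List.getElem_of_mem h
      have hk' : k < l1.length := by omega
      have : F[k] = F.getD k 0 := (List.getD_eq_getElem F 0 hk).symm
      rw [← hFk, this, hF k hk']
      by_cases hfo : l1[k] ∉ l1.take k
      · rw [if_pos hfo]
        exact (PySem.List.le_foldl_max LB 0).2 _
          (List.mem_map_of_mem (by rw [PySem.List.mem_dedup]; exact List.getElem_mem hk'))
      · rw [if_neg hfo]; exact (PySem.List.le_foldl_max LB 0).1
  · rcases PySem.List.foldl_max_mem LB (0:Int) with h | h
    · rw [h]; exact (PySem.List.le_foldl_max F 0).1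
    · rw [hLB] at h
      obtain ⟨c, hc, heq⟩ := List.mem_map.mp h
      rw [hLB, ← heq]
      rw [PySem.List.mem_dedup] at hc
      have hsome : (PySem.List.index? l1 c).isSome = true :=
        (PySem.List.index?_isSome_iff (xs := l1) (v := c)).mpr hc
      obtain ⟨k, hik⟩ : ∃ k, PySem.List.index? l1 c = some k :=
        Option.isSome_iff_exists.mp hsome
      obtain ⟨hk, hgk, hfirst⟩ := PySem.List.getElem_of_index?_eq_some hik
      have hfo : l1[k] ∉ l1.take k := by
        intro hmem
        obtain ⟨j, hj, hje⟩ := List.getElem_of_mem hmem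
        have hjk : j < k := by
          have := hj; simp [List.length_take] at this; omega
        rw [List.getElem_take] at hje
        rw [hgk] at hje
        exact hfirst j hjk hje
      have hFk : F.getD k 0 = (l2.count c : Int) := by
        rw [hF k hk, if_pos hfo, hgk]
      have hmemF : F.getD k 0 ∈ F := by
        rw [List.getD_eq_getElem F 0 (by omega)]; exact List.getElem_mem _
      calc ((l2.count c : Int)) = F.getD k 0 := hFk.symm
        _ ≤ F.foldl max 0 := (PySem.List.le_foldl_max F 0).2 _ hmemF

-- ===== VERDICT (by name: the statement is the Claim_ definition above) =====
theorem str_check2_spec : Claim_equal_str_check2 := by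
  intro str1 str2 _
  unfold Spec_str_check2 str_check2 str_check2_alt
  simp only [PySem.Str.len_eq, PySem.List.pyRepeat_singleton, Int.toNat_natCast]
  set l1 := str1.toList with hl1
  set l2 := str2.toList with hl2
  rw [PySem.List.foldl_pyRange_zero_pyGetD' l2 ' '
    (fun cl c => (PySem.List.pyRange 0 (l1.length : Int) 1).foldl (stepA l1 c) cl)
    (List.replicate l1.length 0)]
  set F := l2.foldl (fun cl c => (PySem.List.pyRange (0:Int) (l1.length:Int) 1).foldl (stepA l1 c) cl)
    (List.replicate l1.length (0:Int)) with hFdef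
  have hlen : F.length = l1.length := by
    rw [hFdef, outerA_len]; simp
  have hF : ∀ k (hk : k < l1.length),
      F.getD k 0 = if l1[k] ∉ l1.take k then (l2.count l1[k] : Int) else 0 := by
    intro k hk
    rw [hFdef, outerA l1 l2 _ (by simp) k hk]
    simp [List.getD_eq_getElem?_getD, hk]
  have hmax : (fun (r e : Int) => if e > r then e else r) = max := by
    funext r e; split_ifs <;> omega
  rw [hmax, max_folds_eq l1 l2 F hlen hF]
  -- B's side: the dict holds the character counts of str2
  rw [List.foldl_map]
  congr 1
  funext b c
  rw [PySem.Dict.foldl_insert_getD_add_one_eq_counter, PySem.Dict.getD_counter]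
  split_ifs <;> omega
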